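-- pv_equiv track=rewrite | github.com/dillon4287/CodeProjects | Python/DealScan/dealscan.py | checkIfOne
-- ===== SOURCE A (Python) =====
-- def checkIfOne(lenders, yesNoList):
--     yescounter = 0
--     for i in  range(len(lenders)):
--         if yesNoList[i] == 'Yes':
--             if yescounter == 0:
--                 wasLead = lenders[i]
--                 yescounter += 1
--             elif wasLead != lenders[i]:
--                 return False
--     return True
-- ===== SOURCE B (Python) =====
-- def checkIfOne(lenders, yesNoList):
--     leads = {lenders[i] for i in range(len(lenders)) if yesNoList[i] == 'Yes'}
--     return len(leads) <= 1
-- ===== Notes on version B (the rewrite author's own statement) =====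
-- stated objective: idiomatic
-- what changed: Instead of tracking the first-seen lead lender with a counter and early-exiting on a mismatch, B collects the set of distinct lenders at 'Yes' positions in one comprehension and checks its cardinality is at most 1.
-- outside the precondition, e.g. on checkIfOne(['a', 'b', 'c'], ['Yes', 'Yes']): A returns False, B raises IndexError
import Mathlib
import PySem

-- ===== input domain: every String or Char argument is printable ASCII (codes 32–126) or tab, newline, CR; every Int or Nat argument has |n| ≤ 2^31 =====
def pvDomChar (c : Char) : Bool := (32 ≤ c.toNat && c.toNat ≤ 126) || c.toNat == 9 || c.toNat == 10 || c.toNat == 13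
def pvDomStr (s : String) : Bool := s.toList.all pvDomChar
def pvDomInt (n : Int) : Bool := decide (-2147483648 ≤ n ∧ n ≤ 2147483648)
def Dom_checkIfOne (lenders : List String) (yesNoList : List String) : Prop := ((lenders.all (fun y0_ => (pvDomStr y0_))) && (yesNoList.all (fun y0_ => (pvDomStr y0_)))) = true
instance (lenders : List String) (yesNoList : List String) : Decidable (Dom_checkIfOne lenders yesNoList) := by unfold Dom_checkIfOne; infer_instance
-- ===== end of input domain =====

-- B replaces A's first-lead/counter tracking with a set of all lead lenders at 'Yes'
-- positions plus a cardinality check (more idiomatic; same O(n) cost).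


-- ===== PORT A =====
-- the for-loop over range(len(lenders)) with state (yescounter, wasLead); wasLead is
-- unbound before the first 'Yes' and only read after yescounter ≠ 0, modelled by "".
-- pyGetD is exact under Pre_ (every index accessed is in range for both lists).
def checkIfOneLoop (lenders : List String) (yesNoList : List String) :
    List Int → Int → String → Bool
  | [], _, _ => true
  | i :: rest, yescounter, wasLead =>
    if PySem.List.pyGetD yesNoList i "" = "Yes" then
      if yescounter = 0 then
        checkIfOneLoop lenders yesNoList rest (yescounter + 1) (PySem.List.pyGetD lenders i "")
      else if wasLead ≠ PySem.List.pyGetD lenders i "" then false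
      else checkIfOneLoop lenders yesNoList rest yescounter wasLead
    else checkIfOneLoop lenders yesNoList rest yescounter wasLead

def checkIfOne (lenders : List String) (yesNoList : List String) : Bool :=
  checkIfOneLoop lenders yesNoList (PySem.List.pyRange 0 (lenders.length : Int) 1) 0 ""

-- ===== PORT B =====
-- leads = {lenders[i] for i in range(len(lenders)) if yesNoList[i] == 'Yes'}; len(leads) <= 1
def checkIfOne_alt (lenders : List String) (yesNoList : List String) : Bool :=
  let leads : PySem.Set String :=
    (PySem.List.pyRange 0 (lenders.length : Int) 1).foldl
      (fun s i => if PySem.List.pyGetD yesNoList i "" = "Yes"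
                  then PySem.Set.add s (PySem.List.pyGetD lenders i "") else s)
      PySem.Set.empty
  decide (PySem.Set.len leads ≤ 1)

-- ===== PRECONDITION & SPEC =====
-- Pre_ excludes inputs where yesNoList is shorter than lenders: there A raises
-- IndexError on almost all of them, and on the rest only returns False by exiting
-- early before reaching the out-of-range index (B raises IndexError there).
def Pre_checkIfOne (lenders : List String) (yesNoList : List String) : Prop :=
  lenders.length ≤ yesNoList.length
instance (lenders : List String) (yesNoList : List String) : Decidable (Pre_checkIfOne lenders yesNoList) := by unfold Pre_checkIfOne; infer_instance

def pvWitness_checkIfOne : List String × List String :=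
  (["BankOne", "BankOne", "BankTwo"], ["Yes", "Yes", "No"])

def Spec_checkIfOne (lenders : List String) (yesNoList : List String) (out : Bool) : Prop := out = checkIfOne_alt lenders yesNoList
instance (lenders : List String) (yesNoList : List String) (out : Bool) : Decidable (Spec_checkIfOne lenders yesNoList out) := by unfold Spec_checkIfOne; infer_instance

-- ===== CLAIM (what is proved, stated in full; the proofs are below) =====
def Claim_equal_checkIfOne : Prop := ∀ (lenders : List String) (yesNoList : List String), Dom_checkIfOne lenders yesNoList → Pre_checkIfOne lenders yesNoList → Spec_checkIfOne lenders yesNoList (checkIfOne lenders yesNoList)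

-- ===== LEMMAS AND PROOFS =====

-- the sequence of lenders at 'Yes' positions
def yesLenders (lenders yesNoList : List String) : List String :=
  (lenders.zip yesNoList).filterMap (fun p => if p.2 = "Yes" then some p.1 else none)

-- A's loop, expressed on the suffix of yes-lenders
def specA : List String → Int → String → Bool
  | [], _, _ => true
  | a :: L, c, w =>
    if c = 0 then specA L (c + 1) a
    else if w ≠ a then false
    else specA L c w

lemma yesLenders_drop_cons (lenders yesNoList : List String) (k : Nat)
    (hk : k < lenders.length) (hle : lenders.length ≤ yesNoList.length) :
    yesLenders (lenders.drop k) (yesNoList.drop k)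
      = if yesNoList[k]'(by omega) = "Yes"
        then lenders[k] :: yesLenders (lenders.drop (k+1)) (yesNoList.drop (k+1))
        else yesLenders (lenders.drop (k+1)) (yesNoList.drop (k+1)) := by
  rw [List.drop_eq_getElem_cons hk, List.drop_eq_getElem_cons (show k < yesNoList.length by omega)]
  simp only [yesLenders, List.zip_cons_cons, List.filterMap_cons]
  split_ifs <;> simp_all

lemma loopA_eq_specA (lenders yesNoList : List String)
    (hle : lenders.length ≤ yesNoList.length) :
    ∀ (k : Nat) (c : Int) (w : String), k ≤ lenders.length →
      checkIfOneLoop lenders yesNoList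
          (PySem.List.pyRange (k : Int) (lenders.length : Int) 1) c w
        = specA (yesLenders (lenders.drop k) (yesNoList.drop k)) c w := by
  intro k
  induction hn : lenders.length - k generalizing k with
  | zero =>
    intro c w hk
    have hk' : k = lenders.length := by omega
    subst hk'
    rw [PySem.List.pyRange_one_eq_nil (le_refl _)]
    simp [checkIfOneLoop, yesLenders, List.drop_length, specA]
  | succ m ih =>
    intro c w hk
    have hklt : k < lenders.length := by omega
    rw [PySem.List.pyRange_one_cons (by exact_mod_cast hklt)]
    have h1 : ((k : Int) + 1) = ((k + 1 : Nat) : Int) := by push_cast; ring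
    rw [yesLenders_drop_cons lenders yesNoList k hklt hle]
    have hgy : PySem.List.pyGetD yesNoList (k : Int) "" = yesNoList[k]'(by omega) := by
      rw [PySem.List.pyGetD_eq_getElem yesNoList "" (by positivity) (by exact_mod_cast (by omega : k < yesNoList.length))]
      simp
    have hgl : PySem.List.pyGetD lenders (k : Int) "" = lenders[k] := by
      rw [PySem.List.pyGetD_eq_getElem lenders "" (by positivity) (by exact_mod_cast hklt)]
      simp
    simp only [checkIfOneLoop, hgy, hgl, h1]
    split_ifs with hy hc hw
    · rw [ih (k+1) (by omega) _ _ (by omega)]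
      simp [specA, hc]
    · simp [specA, hc, hw]
    · rw [ih (k+1) (by omega) _ _ (by omega)]
      simp only [specA]
      split_ifs
      simp_all
    · rw [ih (k+1) (by omega) _ _ (by omega)]

lemma foldB_eq_fold_yesLenders (lenders yesNoList : List String)
    (hle : lenders.length ≤ yesNoList.length) :
    ∀ (k : Nat) (s : PySem.Set String), k ≤ lenders.length →
      (PySem.List.pyRange (k : Int) (lenders.length : Int) 1).foldl
          (fun s i => if PySem.List.pyGetD yesNoList i "" = "Yes"
                      then PySem.Set.add s (PySem.List.pyGetD lenders i "") else s) s
        = (yesLenders (lenders.drop k) (yesNoList.drop k)).foldl PySem.Set.add s := by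
  intro k
  induction hn : lenders.length - k generalizing k with
  | zero =>
    intro s hk
    have hk' : k = lenders.length := by omega
    subst hk'
    rw [PySem.List.pyRange_one_eq_nil (le_refl _)]
    simp [yesLenders, List.drop_length]
  | succ m ih =>
    intro s hk
    have hklt : k < lenders.length := by omega
    rw [PySem.List.pyRange_one_cons (by exact_mod_cast hklt)]
    have h1 : ((k : Int) + 1) = ((k + 1 : Nat) : Int) := by push_cast; ring
    rw [yesLenders_drop_cons lenders yesNoList k hklt hle]
    have hgy : PySem.List.pyGetD yesNoList (k : Int) "" = yesNoList[k]'(by omega) := by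
      rw [PySem.List.pyGetD_eq_getElem yesNoList "" (by positivity) (by exact_mod_cast (by omega : k < yesNoList.length))]
      simp
    have hgl : PySem.List.pyGetD lenders (k : Int) "" = lenders[k] := by
      rw [PySem.List.pyGetD_eq_getElem lenders "" (by positivity) (by exact_mod_cast hklt)]
      simp
    simp only [List.foldl_cons, hgy, hgl, h1]
    split_ifs with hy
    · rw [ih (k+1) (by omega) _ (by omega)]
      simp
    · rw [ih (k+1) (by omega) _ (by omega)]

lemma length_le_foldl_add (L : List String) :
    ∀ s : PySem.Set String, s.length ≤ (L.foldl PySem.Set.add s).length := by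
  induction L with
  | nil => intro s; simp
  | cons a L ih =>
    intro s
    refine le_trans ?_ (ih (PySem.Set.add s a))
    simp only [PySem.Set.add]
    split_ifs <;> simp

lemma specA_ne_zero (L : List String) :
    ∀ (c : Int) (w : String), c ≠ 0 → specA L c w = L.all (fun x => x == w) := by
  induction L with
  | nil => intro c w _; simp [specA]
  | cons a L ih =>
    intro c w hc
    simp only [specA, if_neg hc]
    by_cases hw : w = a
    · subst hw
      simp [ih c w hc]
    · simp [hw, Ne.symm hw]

lemma foldl_add_singleton (L : List String) :
    ∀ w : String, decide ((L.foldl PySem.Set.add [w]).length ≤ 1) = L.all (fun x => x == w) := by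
  induction L with
  | nil => intro w; simp
  | cons a L ih =>
    intro w
    by_cases hw : a = w
    · subst hw
      simpa [PySem.Set.add, PySem.Set.contains] using ih a
    · have hadd : PySem.Set.add [w] a = [w, a] := by
        simp [PySem.Set.add, PySem.Set.contains, hw]
      simp only [List.foldl_cons, hadd]
      have h2 := length_le_foldl_add L [w, a]
      simp only [List.length_cons, List.length_nil] at h2
      rw [decide_eq_false (by omega)]
      simp [hw]

lemma specA_eq_card (L : List String) :
    specA L 0 "" = decide (PySem.Set.len (L.foldl PySem.Set.add PySem.Set.empty) ≤ 1) := by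
  cases L with
  | nil => simp [specA, PySem.Set.len, PySem.Set.empty]
  | cons a L =>
    have h1 : specA (a :: L) 0 "" = specA L 1 a := by simp [specA]
    have hadd : PySem.Set.add PySem.Set.empty a = [a] := by
      simp [PySem.Set.add, PySem.Set.contains, PySem.Set.empty]
    rw [h1, specA_ne_zero L 1 a (by norm_num), List.foldl_cons, hadd,
        ← foldl_add_singleton L a]
    apply (decide_eq_decide.mpr ?_).symm
    simp [PySem.Set.len]

-- ===== VERDICT (by name: the statement is the Claim_ definition above) =====
theorem checkIfOne_spec : Claim_equal_checkIfOne := by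
  intro lenders yesNoList _ hpre
  unfold Spec_checkIfOne checkIfOne checkIfOne_alt
  have hA := loopA_eq_specA lenders yesNoList hpre 0 0 "" (by omega)
  have hB := foldB_eq_fold_yesLenders lenders yesNoList hpre 0 PySem.Set.empty (by omega)
  simp only [Nat.cast_zero] at hA hB
  simp only [List.drop_zero] at hA hB
  rw [hA, hB, specA_eq_card]
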